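-- pv_equiv track=rewrite | github.com/Wonjin-Lee/Programmers | 2018 WINTER/snack.py | solution
-- ===== SOURCE A (Python) =====
-- def solution(cookie):
--     answer = 0
--
--     for i in range(len(cookie)-1):
--         for j in range(i, len(cookie)-1):
--             leftSum = sum(cookie[i:j+1])
--             for k in range(j+1, len(cookie)):
--                 rightSum = sum(cookie[j+1:k+1])
--                 if leftSum == rightSum and answer < leftSum:
--                     answer = leftSum
--
--     return answer
-- ===== SOURCE B (Python) =====
-- def solution(cookie):
--     n = len(cookie)
--     pre = [0]
--     acc = 0
--     for c in cookie:
--         acc += c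
--         pre.append(acc)
--     answer = 0
--     for j in range(n - 1):
--         left = {pre[j + 1] - pre[i] for i in range(j + 1)}
--         for k in range(j + 1, n):
--             s = pre[k + 1] - pre[j + 1]
--             if s > answer and s in left:
--                 answer = s
--     return answer
-- ===== Notes on version B (the rewrite author's own statement) =====
-- stated objective: faster
-- what changed: Replaces A's O(n^4) triple loop that re-sums every left/right segment with prefix sums and, for each split point, a set of all left-segment sums checked against each right-segment sum.
import Mathlib
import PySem

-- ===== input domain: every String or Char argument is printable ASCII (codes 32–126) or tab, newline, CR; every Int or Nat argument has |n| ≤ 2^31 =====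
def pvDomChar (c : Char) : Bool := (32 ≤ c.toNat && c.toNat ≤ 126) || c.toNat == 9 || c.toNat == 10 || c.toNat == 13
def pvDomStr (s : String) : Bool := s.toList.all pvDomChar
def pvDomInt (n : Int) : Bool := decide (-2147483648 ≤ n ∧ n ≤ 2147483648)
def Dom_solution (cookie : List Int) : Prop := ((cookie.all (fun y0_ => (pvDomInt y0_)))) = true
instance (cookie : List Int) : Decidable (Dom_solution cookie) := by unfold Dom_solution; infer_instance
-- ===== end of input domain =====

-- B replaces A's O(n^4) brute force (re-summing every segment) by prefix sums and,
-- per split point, a set of left-segment sums intersected against right-segment sums (O(n^2)).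

-- ===== PORT A =====
def solution (cookie : List Int) : Int :=
  (PySem.List.pyRange 0 ((cookie.length : Int) - 1) 1).foldl (fun answer i =>
    (PySem.List.pyRange i ((cookie.length : Int) - 1) 1).foldl (fun answer j =>
      let leftSum := (PySem.List.slice cookie (some i) (some (j + 1))).sum
      (PySem.List.pyRange (j + 1) (cookie.length : Int) 1).foldl (fun answer k =>
        let rightSum := (PySem.List.slice cookie (some (j + 1)) (some (k + 1))).sum
        if leftSum = rightSum ∧ answer < leftSum then leftSum else answer) answer) answer) 0

-- ===== PORT B =====
-- prefix list: pre = [0]; acc = 0; for c in cookie: acc += c; pre.append(acc)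
def preList (cookie : List Int) : List Int :=
  (cookie.foldl (fun st c => (st.1 ++ [st.2 + c], st.2 + c)) (([0] : List Int), (0 : Int))).1

def solution_alt (cookie : List Int) : Int :=
  let n : Int := cookie.length
  let pre := preList cookie
  (PySem.List.pyRange 0 (n - 1) 1).foldl (fun answer j =>
    let left : PySem.Set Int := PySem.Set.ofList
      ((PySem.List.pyRange 0 (j + 1) 1).map (fun i =>
        PySem.List.pyGetD pre (j + 1) 0 - PySem.List.pyGetD pre i 0))
    (PySem.List.pyRange (j + 1) n 1).foldl (fun answer k =>
      let s := PySem.List.pyGetD pre (k + 1) 0 - PySem.List.pyGetD pre (j + 1) 0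
      if s > answer ∧ PySem.Set.contains left s then s else answer) answer) 0

-- ===== PRECONDITION & SPEC =====
def Spec_solution (cookie : List Int) (out : Int) : Prop := out = solution_alt cookie
instance (cookie : List Int) (out : Int) : Decidable (Spec_solution cookie out) := by unfold Spec_solution; infer_instance

-- ===== CLAIM (what is proved, stated in full; the proofs are below) =====
def Claim_equal_solution : Prop := ∀ (cookie : List Int), Dom_solution cookie → Spec_solution cookie (solution cookie)

-- ===== LEMMAS AND PROOFS =====

-- prefix sum value: Q cookie a = sum of the first a elements
def Q (cookie : List Int) (a : Int) : Int := (cookie.take a.toNat).sum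

-- generic: a "conditional running max" fold is a max-fold over the filtered values
lemma foldl_ext {α β : Type} (l : List α) (f g : β → α → β) (h : ∀ a x, f a x = g a x) (b : β) :
    l.foldl f b = l.foldl g b := by
  have : f = g := funext fun a => funext fun x => h a x
  rw [this]

lemma foldl_guardA {α : Type} (l : List α) (v : α → Int) (c : α → Prop) [DecidablePred c] (a : Int) :
    l.foldl (fun ans x => if c x ∧ ans < v x then v x else ans) a
      = (l.filterMap (fun x => if c x then some (v x) else none)).foldl max a := by
  induction l generalizing a with
  | nil => rfl
  | cons x t ih =>
    simp only [List.foldl_cons, List.filterMap_cons]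
    by_cases hc : c x
    · simp only [hc, if_pos, true_and]
      by_cases hlt : a < v x
      · rw [if_pos hlt, List.foldl_cons, ih]
        congr 1
        omega
      · rw [if_neg hlt, List.foldl_cons, ih]
        congr 1
        omega
    · simp only [hc, false_and, if_false, ih]

lemma foldl_guardB {α : Type} (l : List α) (v : α → Int) (c : α → Prop) [DecidablePred c] (a : Int) :
    l.foldl (fun ans x => if v x > ans ∧ c x then v x else ans) a
      = (l.filterMap (fun x => if c x then some (v x) else none)).foldl max a := by
  rw [← foldl_guardA l v c a]
  apply foldl_ext
  intro a x
  by_cases hc : c x <;> by_cases hlt : a < v x <;> simp [hc, hlt]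

lemma foldl_max_flat {α : Type} (l : List α) (g : α → List Int) (a : Int) :
    l.foldl (fun a x => (g x).foldl max a) a = (l.flatMap g).foldl max a := by
  induction l generalizing a with
  | nil => rfl
  | cons x t ih => simp [List.foldl_cons, List.flatMap_cons, List.foldl_append, ih]

lemma foldl_max_le_iff (l : List Int) (a t : Int) :
    l.foldl max a ≤ t ↔ a ≤ t ∧ ∀ x ∈ l, x ≤ t := by
  induction l generalizing a with
  | nil => simp
  | cons x s ih =>
    simp only [List.foldl_cons, ih, List.mem_cons]
    constructor
    · rintro ⟨h1, h2⟩
      exact ⟨le_trans (le_max_left _ _) h1, fun y hy => hy.elim (fun e => e ▸ le_trans (le_max_right _ _) h1) (h2 y)⟩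
    · rintro ⟨h1, h2⟩
      exact ⟨max_le h1 (h2 x (Or.inl rfl)), fun y hy => h2 y (Or.inr hy)⟩

lemma foldl_max_eq_of_mem_iff (l₁ l₂ : List Int) (a : Int) (h : ∀ x, x ∈ l₁ ↔ x ∈ l₂) :
    l₁.foldl max a = l₂.foldl max a := by
  apply le_antisymm
  · rw [foldl_max_le_iff]
    exact ⟨(PySem.List.le_foldl_max l₂ a).1,
      fun x hx => (PySem.List.le_foldl_max l₂ a).2 x ((h x).1 hx)⟩
  · rw [foldl_max_le_iff]
    exact ⟨(PySem.List.le_foldl_max l₁ a).1,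
      fun x hx => (PySem.List.le_foldl_max l₁ a).2 x ((h x).2 hx)⟩

-- pre list characterization
lemma preList_aux (xs : List Int) (l : List Int) (acc : Int) :
    xs.foldl (fun st c => (st.1 ++ [st.2 + c], st.2 + c)) (l, acc)
      = (l ++ (List.range xs.length).map (fun m => acc + (xs.take (m + 1)).sum), acc + xs.sum) := by
  induction xs generalizing l acc with
  | nil => simp
  | cons x t ih =>
    simp only [List.foldl_cons]
    rw [ih]
    simp [List.range_succ_eq_map, List.map_cons, List.map_map, Function.comp,
      List.take_succ_cons, List.append_assoc, add_assoc]

lemma preList_eq (cookie : List Int) :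
    preList cookie = (List.range (cookie.length + 1)).map (fun m => ((cookie.take m).sum : Int)) := by
  unfold preList
  rw [preList_aux]
  simp [List.range_succ_eq_map, List.map_map, Function.comp]

lemma pyGetD_preList (cookie : List Int) (i : Int) (h0 : 0 ≤ i) (h1 : i ≤ (cookie.length : Int)) :
    PySem.List.pyGetD (preList cookie) i 0 = Q cookie i := by
  rw [PySem.List.pyGetD_of_nonneg (h := h0), preList_eq]
  have hlt : i.toNat < ((List.range (cookie.length + 1)).map
      (fun m => ((cookie.take m).sum : Int))).length := by
    simp; omega
  rw [List.getD_eq_getElem _ _ hlt]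
  simp [Q]

lemma take_sub_sum (xs : List Int) (a b : Nat) (h : a ≤ b) :
    ((xs.drop a).take (b - a)).sum = (xs.take b).sum - (xs.take a).sum := by
  have : xs.take b = xs.take a ++ (xs.drop a).take (b - a) := by
    rw [← List.take_add]
    congr 1
    omega
  rw [this, List.sum_append]
  ring

lemma slice_sum (cookie : List Int) (a b : Int) (h0 : 0 ≤ a) (h1 : a ≤ b) :
    (PySem.List.slice cookie (some a) (some b)).sum = Q cookie b - Q cookie a := by
  rw [PySem.List.slice_toNat (ha := h0) (hb := le_trans h0 h1)]
  exact take_sub_sum cookie a.toNat b.toNat (by omega)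

-- flattened candidate lists of the two programs
def gA (cookie : List Int) : List Int :=
  (PySem.List.pyRange 0 ((cookie.length : Int) - 1) 1).flatMap (fun i =>
    (PySem.List.pyRange i ((cookie.length : Int) - 1) 1).flatMap (fun j =>
      (PySem.List.pyRange (j + 1) (cookie.length : Int) 1).filterMap (fun k =>
        if (PySem.List.slice cookie (some i) (some (j + 1))).sum
            = (PySem.List.slice cookie (some (j + 1)) (some (k + 1))).sum
        then some ((PySem.List.slice cookie (some i) (some (j + 1))).sum) else none)))

def gB (cookie : List Int) : List Int :=
  (PySem.List.pyRange 0 ((cookie.length : Int) - 1) 1).flatMap (fun j =>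
    (PySem.List.pyRange (j + 1) (cookie.length : Int) 1).filterMap (fun k =>
      if PySem.Set.contains (PySem.Set.ofList
            ((PySem.List.pyRange 0 (j + 1) 1).map (fun i =>
              PySem.List.pyGetD (preList cookie) (j + 1) 0
                - PySem.List.pyGetD (preList cookie) i 0)))
          (PySem.List.pyGetD (preList cookie) (k + 1) 0
            - PySem.List.pyGetD (preList cookie) (j + 1) 0) = true
      then some (PySem.List.pyGetD (preList cookie) (k + 1) 0
            - PySem.List.pyGetD (preList cookie) (j + 1) 0) else none))

lemma solution_eq_gA (cookie : List Int) : solution cookie = (gA cookie).foldl max 0 := by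
  unfold solution gA
  simp only [foldl_guardA, foldl_max_flat]

lemma solution_alt_eq_gB (cookie : List Int) : solution_alt cookie = (gB cookie).foldl max 0 := by
  unfold solution_alt gB
  simp only [foldl_guardB, foldl_max_flat, preList]

lemma mem_gA_iff_gB (cookie : List Int) (t : Int) : t ∈ gA cookie ↔ t ∈ gB cookie := by
  unfold gA gB
  simp only [List.mem_flatMap, List.mem_filterMap, PySem.List.mem_pyRange_one,
    Option.ite_none_right_eq_some, Option.some.injEq, PySem.Set.contains_iff,
    PySem.Set.mem_ofList, List.mem_map]
  constructor
  · rintro ⟨i, ⟨hi0, hi1⟩, j, ⟨hij, hj1⟩, k, ⟨hk0, hk1⟩, heq, ht⟩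
    rw [slice_sum _ _ _ hi0 (by omega), slice_sum _ _ _ (by omega) (by omega)] at heq
    rw [slice_sum _ _ _ hi0 (by omega)] at ht
    refine ⟨j, ⟨by omega, hj1⟩, k, ⟨hk0, hk1⟩, ⟨i, ⟨hi0, by omega⟩, ?_⟩, ?_⟩
    · rw [pyGetD_preList cookie (j + 1) (by omega) (by omega),
        pyGetD_preList cookie i (by omega) (by omega),
        pyGetD_preList cookie (k + 1) (by omega) (by omega)]
      linarith
    · rw [pyGetD_preList cookie (k + 1) (by omega) (by omega),
        pyGetD_preList cookie (j + 1) (by omega) (by omega)]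
      linarith
  · rintro ⟨j, ⟨hj0, hj1⟩, k, ⟨hk0, hk1⟩, ⟨i, ⟨hi0, hi1⟩, hmem⟩, ht⟩
    rw [pyGetD_preList _ _ (by omega) (by omega), pyGetD_preList _ _ (by omega) (by omega),
      pyGetD_preList _ _ (by omega) (by omega)] at hmem
    rw [pyGetD_preList _ _ (by omega) (by omega), pyGetD_preList _ _ (by omega) (by omega)] at ht
    refine ⟨i, ⟨hi0, by omega⟩, j, ⟨by omega, hj1⟩, k, ⟨hk0, hk1⟩, ?_, ?_⟩
    · rw [slice_sum _ _ _ hi0 (by omega), slice_sum _ _ _ (by omega) (by omega)]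
      linarith
    · rw [slice_sum _ _ _ hi0 (by omega)]
      linarith

-- ===== VERDICT (by name: the statement is the Claim_ definition above) =====
theorem solution_spec : Claim_equal_solution := by
  unfold Claim_equal_solution Spec_solution
  intro cookie _
  rw [solution_eq_gA, solution_alt_eq_gB]
  exact foldl_max_eq_of_mem_iff _ _ _ (mem_gA_iff_gB cookie)
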